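-- pv_equiv track=rewrite | github.com/AdamZhouSE/pythonHomework | Code/CodeRecords/2974/60623/245157.py | noRotate
-- ===== SOURCE A (Python) =====
-- def isRotate(str):
-- 	a=len(str)
-- 	i=0
-- 	while i<a:
-- 		if str[i]!=str[a-1-i]:
-- 			return False
-- 		i+=1
-- 	if i==a:
-- 		return True
--
-- def noRotate(str):
-- 	size=len(str)
-- 	i=2
-- 	result=0
-- 	l=[]
-- 	while i<=size:
-- 		j=0
-- 		while (i+j)<=size:
-- 			# if i%2==1 and isRotate(str[j:j+i]):
-- 			# 	if str[j:j+i] in l: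
-- 			# 		j+=1
-- 			# 		continue
-- 			# 	else:
-- 			# 		result+=1
-- 			# 		l.append(str[j:j+i])
-- 			if i%2==0 or (not isRotate(str[j:j+i])):
-- 				if str[j:j+i] in l:
-- 					j+=1
-- 					continue
-- 				else:
-- 					result+=1
-- 					l.append(str[j:j+1])
-- 			j+=1
-- 		i+=1
-- 	return result
-- ===== SOURCE B (Python) =====
-- def noRotate(str):
--     # total substrings of length >= 2, minus odd-length (>=3) palindromic
--     # substrings counted by center expansion.
--     n = len(str)
--     odd = 0
--     for c in range(n):
--         r = 1
--         while r <= c and c + r < n and str[c - r] == str[c + r]: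
--             odd += 1
--             r += 1
--     return n * (n - 1) // 2 - odd
-- ===== Notes on version B (the rewrite author's own statement) =====
-- stated objective: faster
-- what changed: Replaces the triple-nested scan over all substrings (with a per-substring palindrome check and a dead dedup-list membership scan) by a closed-form total n(n-1)/2 minus a center-expansion count of odd-length palindromic substrings.
import Mathlib
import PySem

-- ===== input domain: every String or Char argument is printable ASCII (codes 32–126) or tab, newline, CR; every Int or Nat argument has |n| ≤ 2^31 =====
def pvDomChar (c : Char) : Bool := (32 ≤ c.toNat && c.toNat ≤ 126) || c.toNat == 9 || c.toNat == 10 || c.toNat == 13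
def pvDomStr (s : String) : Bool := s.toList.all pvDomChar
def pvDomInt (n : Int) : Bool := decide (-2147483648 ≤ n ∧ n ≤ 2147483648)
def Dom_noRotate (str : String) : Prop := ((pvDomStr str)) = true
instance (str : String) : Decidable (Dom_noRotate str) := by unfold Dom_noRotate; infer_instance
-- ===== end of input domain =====

-- B replaces A's triple-nested substring scan by n(n-1)/2 minus a center-expansion
-- count of odd-length palindromic substrings (measurably faster, asymptotic change).

-- ===== PORT A =====
-- isRotate: while i < a compare str[i] with str[a-1-i]; indices are always in range,
-- so List.getD is exact for Python's str[k] here.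
def pvIsRotateAux (t : List Char) (a : Nat) : Nat → Nat → Bool
  | _i, 0 => true                                   -- loop done (i = a): return True
  | i, fuel+1 =>
    if t.getD i ' ' ≠ t.getD (a - 1 - i) ' ' then false
    else pvIsRotateAux t a (i+1) fuel

def pvIsRotate (t : List Char) : Bool := pvIsRotateAux t t.length 0 t.length

-- inner while loop over j (str[j:j+i] = (s.drop j).take i, exact for 0 ≤ j ≤ j+i)
def pvInner (s : List Char) (size i : Nat) : Nat → Nat → List (List Char) → Int → List (List Char) × Int
  | 0, _j, l, result => (l, result)
  | fuel+1, j, l, result =>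
    if i % 2 = 0 ∨ ¬ (pvIsRotate ((s.drop j).take i) = true) then
      if (s.drop j).take i ∈ l then pvInner s size i fuel (j+1) l result
      else pvInner s size i fuel (j+1) (l ++ [(s.drop j).take 1]) (result+1)
    else pvInner s size i fuel (j+1) l result

-- outer while loop over i
def pvOuter (s : List Char) (size : Nat) : Nat → Nat → List (List Char) → Int → Int
  | 0, _i, _l, result => result
  | fuel+1, i, l, result =>
    let p := pvInner s size i (size + 1 - i) 0 l result
    pvOuter s size fuel (i+1) p.1 p.2

def noRotate (str : String) : Int :=
  let s := str.toList
  pvOuter s s.length (s.length - 1) 2 [] 0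

-- ===== PORT B =====
-- while r <= c and c+r < n and str[c-r] == str[c+r]: odd += 1; r += 1
def pvExpand (s : List Char) (n c : Nat) : Nat → Nat → Nat
  | 0, _r => 0
  | fuel+1, r =>
    if r ≤ c ∧ c + r < n ∧ s.getD (c - r) ' ' = s.getD (c + r) ' ' then
      1 + pvExpand s n c fuel (r+1)
    else 0

def noRotate_alt (str : String) : Int :=
  let s := str.toList
  let n := s.length
  let odd := (List.range n).foldl (fun acc c => acc + pvExpand s n c n 1) 0
  PySem.Int.floordiv ((n : Int) * ((n : Int) - 1)) 2 - (odd : Int)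

-- ===== PRECONDITION & SPEC =====
def Spec_noRotate (str : String) (out : Int) : Prop := out = noRotate_alt str
instance (str : String) (out : Int) : Decidable (Spec_noRotate str out) := by unfold Spec_noRotate; infer_instance

-- ===== CLAIM (what is proved, stated in full; the proofs are below) =====
def Claim_equal_noRotate : Prop := ∀ (str : String), Dom_noRotate str → Spec_noRotate str (noRotate str)

-- ===== LEMMAS AND PROOFS =====

-- "substring str[j:j+i] is a palindrome", stated on indices of s
def palB (s : List Char) (i j : Nat) : Bool :=
  decide (∀ t, t < i → s.getD (j + t) ' ' = s.getD (j + i - 1 - t) ' ')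

-- "radius-r odd palindrome centered at c fits in s"
def goodB (s : List Char) (c r : Nat) : Bool :=
  decide (r ≤ c ∧ c + r < s.length ∧ ∀ k, k < r + 1 → 1 ≤ k → s.getD (c - k) ' ' = s.getD (c + k) ' ')

-- A's per-cell contribution
def fN (s : List Char) (i j : Nat) : Nat :=
  if i % 2 = 0 ∨ ¬ (palB s i j = true) then 1 else 0

theorem pvIsRotateAux_spec (t : List Char) (a : Nat) :
    ∀ fuel i, i + fuel = a →
      (pvIsRotateAux t a i fuel = true ↔
        ∀ k, k < a → i ≤ k → t.getD k ' ' = t.getD (a - 1 - k) ' ') := by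
  intro fuel
  induction fuel with
  | zero =>
    intro i h
    simp only [pvIsRotateAux]
    constructor
    · intro _ k hk hik; omega
    · intro _; trivial
  | succ m ih =>
    intro i h
    simp only [pvIsRotateAux]
    by_cases he : t.getD i ' ' = t.getD (a - 1 - i) ' '
    · simp only [he, ne_eq, not_true_eq_false, if_false]
      rw [ih (i+1) (by omega)]
      constructor
      · intro H k hk hik
        rcases Nat.eq_or_lt_of_le hik with rfl | hlt
        · exact he
        · exact H k hk hlt
      · intro H k hk hik
        exact H k hk (by omega)
    · simp only [he, ne_eq, not_false_eq_true, if_true]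
      constructor
      · intro hf; exact absurd hf (by simp)
      · intro H; exact absurd (H i (by omega) le_rfl) he

theorem pvIsRotate_slice (s : List Char) (i j : Nat) (h : j + i ≤ s.length) :
    pvIsRotate ((s.drop j).take i) = palB s i j := by
  have hlen : ((s.drop j).take i).length = i := by
    simp [List.length_take, List.length_drop]; omega
  have hget : ∀ k, k < i → ((s.drop j).take i).getD k ' ' = s.getD (j + k) ' ' := by
    intro k hk
    simp [List.getD_eq_getElem?_getD, hk, List.getElem?_drop]
  rw [Bool.eq_iff_iff]
  unfold pvIsRotate palB
  rw [hlen, pvIsRotateAux_spec _ _ i 0 (by omega)]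
  rw [decide_eq_true_eq]
  constructor
  · intro H t ht
    have h1 := hget t ht
    have h2 := hget (i - 1 - t) (by omega)
    have h3 : j + (i - 1 - t) = j + i - 1 - t := by omega
    rw [h3] at h2
    rw [← h1, ← h2]
    exact H t ht (Nat.zero_le t)
  · intro H k hk _
    have h1 := hget k hk
    have h2 := hget (i - 1 - k) (by omega)
    have h3 : j + (i - 1 - k) = j + i - 1 - k := by omega
    rw [h3] at h2
    rw [h1, h2]
    exact H k hk

theorem pvInner_spec (s : List Char) (i : Nat) (hi : 2 ≤ i) :
    ∀ fuel j l result, i + j + fuel = s.length + 1 →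
      (∀ x ∈ l, x.length ≤ 1) →
      ∃ l', pvInner s s.length i fuel j l result =
              (l', result + (∑ t ∈ Finset.range fuel, fN s i (j + t) : Nat)) ∧
            (∀ x ∈ l', x.length ≤ 1) := by
  intro fuel
  induction fuel with
  | zero =>
    intro j l result _ hinv
    exact ⟨l, by simp [pvInner], hinv⟩
  | succ m ih =>
    intro j l result hfuel hinv
    have hji : j + i ≤ s.length := by omega
    have hlen : ((s.drop j).take i).length = i := by
      simp [List.length_take, List.length_drop]; omega
    have hmem : (s.drop j).take i ∉ l := by
      intro hm
      have := hinv _ hm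
      omega
    have hsum : (∑ t ∈ Finset.range (m + 1), fN s i (j + t) : Nat)
        = (∑ t ∈ Finset.range m, fN s i (j + 1 + t)) + fN s i j := by
      rw [Finset.sum_range_succ']
      simp only [Nat.add_zero]
      congr 1
      apply Finset.sum_congr rfl
      intro t _
      congr 1
      omega
    simp only [pvInner]
    by_cases hc : i % 2 = 0 ∨ ¬ (pvIsRotate ((s.drop j).take i) = true)
    · rw [if_pos hc, if_neg hmem]
      have hfc : fN s i j = 1 := by
        rw [pvIsRotate_slice s i j hji] at hc
        unfold fN
        rw [if_pos hc]
      have hinv' : ∀ x ∈ l ++ [(s.drop j).take 1], x.length ≤ 1 := by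
        intro x hx
        rcases List.mem_append.mp hx with h | h
        · exact hinv x h
        · simp at h
          subst h
          simp [List.length_take]
      obtain ⟨l', hEq, hinv''⟩ := ih (j+1) (l ++ [(s.drop j).take 1]) (result+1) (by omega) hinv'
      refine ⟨l', ?_, hinv''⟩
      rw [hEq, hsum, hfc]
      congr 1
      push_cast
      ring
    · rw [if_neg hc]
      have hfc : fN s i j = 0 := by
        rw [pvIsRotate_slice s i j hji] at hc
        unfold fN
        rw [if_neg hc]
      obtain ⟨l', hEq, hinv''⟩ := ih (j+1) l result (by omega) hinv
      refine ⟨l', ?_, hinv''⟩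
      rw [hEq, hsum, hfc]
      simp

theorem pvOuter_spec (s : List Char) :
    ∀ fuel i l result, i + fuel = s.length + 1 → 2 ≤ i →
      (∀ x ∈ l, x.length ≤ 1) →
      pvOuter s s.length fuel i l result =
        result + (∑ d ∈ Finset.range fuel, ∑ t ∈ Finset.range (s.length + 1 - (i + d)), fN s (i + d) t : Nat) := by
  intro fuel
  induction fuel with
  | zero =>
    intro i l result _ _ _
    simp [pvOuter]
  | succ m ih =>
    intro i l result hfuel hi hinv
    obtain ⟨l', hEq, hinv'⟩ := pvInner_spec s i hi (s.length + 1 - i) 0 l result (by omega) hinv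
    simp only [pvOuter, hEq]
    rw [ih (i+1) l' _ (by omega) (by omega) hinv']
    have hs : (∑ d ∈ Finset.range (m+1), ∑ t ∈ Finset.range (s.length + 1 - (i + d)), fN s (i + d) t)
        = (∑ t ∈ Finset.range (s.length + 1 - i), fN s i t)
          + ∑ d ∈ Finset.range m, ∑ t ∈ Finset.range (s.length + 1 - (i + 1 + d)), fN s (i + 1 + d) t := by
      rw [Finset.sum_range_succ']
      simp only [Nat.add_zero]
      rw [add_comm]
      congr 1
      apply Finset.sum_congr rfl
      intro d _
      have h1 : i + (d + 1) = i + 1 + d := by omega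
      rw [h1]
    rw [hs]
    simp only [Nat.zero_add]
    push_cast
    ring

theorem noRotate_eq_sum (str : String) :
    noRotate str =
      ((∑ d ∈ Finset.range (str.toList.length - 1),
          ∑ j ∈ Finset.range (str.toList.length - 1 - d), fN str.toList (d + 2) j : Nat) : Int) := by
  simp only [noRotate]
  rcases Nat.eq_zero_or_pos str.toList.length with h0 | hpos
  · rw [h0]
    simp [pvOuter]
  · rw [pvOuter_spec str.toList (str.toList.length - 1) 2 [] 0 (by omega) (by norm_num) (by simp)]
    rw [zero_add]
    norm_cast
    apply Finset.sum_congr rfl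
    intro d _
    have h1 : str.toList.length + 1 - (2 + d) = str.toList.length - 1 - d := by omega
    have h2 : 2 + d = d + 2 := by omega
    rw [h1, h2]

theorem pvExpand_spec (s : List Char) (c : Nat) :
    ∀ fuel r, 1 ≤ r → (∀ k, k < r → 1 ≤ k → s.getD (c - k) ' ' = s.getD (c + k) ' ') →
      pvExpand s s.length c fuel r =
        ∑ t ∈ Finset.range fuel, (if goodB s c (r + t) = true then 1 else 0) := by
  intro fuel
  induction fuel with
  | zero =>
    intro r _ _
    simp [pvExpand]
  | succ m ih =>
    intro r hr hpre
    simp only [pvExpand]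
    by_cases hc : r ≤ c ∧ c + r < s.length ∧ s.getD (c - r) ' ' = s.getD (c + r) ' '
    · rw [if_pos hc]
      have hcase : ∀ k, k < r + 1 → 1 ≤ k → s.getD (c - k) ' ' = s.getD (c + k) ' ' := by
        intro k hk h1k
        rcases Nat.eq_or_lt_of_le (Nat.lt_succ_iff.mp hk) with rfl | hlt
        · exact hc.2.2
        · exact hpre k hlt h1k
      have hg : goodB s c r = true := by
        unfold goodB
        rw [decide_eq_true_eq]
        exact ⟨hc.1, hc.2.1, hcase⟩
      rw [ih (r+1) (by omega) hcase]
      rw [Finset.sum_range_succ']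
      have hss : (∑ t ∈ Finset.range m, (if goodB s c (r + (t + 1)) = true then 1 else 0))
          = ∑ t ∈ Finset.range m, (if goodB s c (r + 1 + t) = true then 1 else 0) := by
        apply Finset.sum_congr rfl
        intro t _
        have h1 : r + (t + 1) = r + 1 + t := by omega
        rw [h1]
      rw [hss]
      simp only [Nat.add_zero]
      rw [if_pos hg]
      omega
    · rw [if_neg hc]
      symm
      apply Finset.sum_eq_zero
      intro t _
      have hng : goodB s c (r + t) ≠ true := by
        unfold goodB
        simp only [ne_eq, decide_eq_true_eq]
        rintro ⟨h1, h2, h3⟩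
        exact hc ⟨by omega, by omega, h3 r (by omega) hr⟩
      simp [hng]

theorem foldl_range_add (n : Nat) (e : Nat → Nat) :
    (List.range n).foldl (fun a c => a + e c) 0 = ∑ c ∈ Finset.range n, e c := by
  induction n with
  | zero => simp
  | succ m ih => rw [List.range_succ, Finset.sum_range_succ]; simp [ih]

theorem noRotate_alt_eq_sum (str : String) :
    noRotate_alt str =
      PySem.Int.floordiv ((str.toList.length : Int) * ((str.toList.length : Int) - 1)) 2 -
        ((∑ c ∈ Finset.range str.toList.length,
            ∑ t ∈ Finset.range str.toList.length, (if goodB str.toList c (t + 1) = true then 1 else 0) : Nat) : Int) := by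
  simp only [noRotate_alt]
  congr 1
  norm_cast
  rw [foldl_range_add]
  apply Finset.sum_congr rfl
  intro c _
  rw [pvExpand_spec str.toList c str.toList.length 1 le_rfl
    (by intro k hk h1k; exact absurd h1k (by omega))]
  apply Finset.sum_congr rfl
  intro t _
  have h1 : 1 + t = t + 1 := by omega
  rw [h1]

theorem palB_iff_goodE (s : List Char) (c r : Nat) (hrc : r ≤ c) (hcr : c + r < s.length) :
    (palB s (2 * r + 1) (c - r) = true ↔
      ∀ k, k < r + 1 → 1 ≤ k → s.getD (c - k) ' ' = s.getD (c + k) ' ') := by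
  unfold palB
  rw [decide_eq_true_eq]
  constructor
  · intro H k hk h1k
    have := H (r - k) (by omega)
    have e1 : c - r + (r - k) = c - k := by omega
    have e2 : c - r + (2 * r + 1) - 1 - (r - k) = c + k := by omega
    rwa [e1, e2] at this
  · intro H t ht
    by_cases htr : t ≤ r
    · rcases Nat.eq_or_lt_of_le htr with rfl | hlt
      · have e1 : c - t + t = c := by omega
        have e2 : c - t + (2 * t + 1) - 1 - t = c := by omega
        rw [e1, e2]
      · have := H (r - t) (by omega) (by omega)
        have e1 : c - r + t = c - (r - t) := by omega
        have e2 : c - r + (2 * r + 1) - 1 - t = c + (r - t) := by omega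
        rw [e1, e2]
        exact this
    · have := H (t - r) (by omega) (by omega)
      have e1 : c - r + t = c + (t - r) := by omega
      have e2 : c - r + (2 * r + 1) - 1 - t = c - (t - r) := by omega
      rw [e1, e2]
      exact this.symm


theorem gsum_eq (s : List Char) :
    (∑ d ∈ Finset.range (s.length - 1), ∑ j ∈ Finset.range (s.length - 1 - d),
        (if ((d + 2) % 2 = 1 ∧ palB s (d + 2) j = true) then 1 else 0))
      = ∑ c ∈ Finset.range s.length, ∑ t ∈ Finset.range s.length,
          (if goodB s c (t + 1) = true then 1 else 0) := by
  have step1 : (∑ d ∈ Finset.range (s.length - 1), ∑ j ∈ Finset.range (s.length - 1 - d),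
        (if ((d + 2) % 2 = 1 ∧ palB s (d + 2) j = true) then 1 else 0))
      = ∑ d ∈ Finset.range s.length, ∑ j ∈ Finset.range s.length,
          (if (j + d + 2 ≤ s.length ∧ d % 2 = 1 ∧ palB s (d + 2) j = true) then 1 else 0) := by
    have inner : ∀ d, d < s.length - 1 →
        (∑ j ∈ Finset.range (s.length - 1 - d),
            (if ((d + 2) % 2 = 1 ∧ palB s (d + 2) j = true) then 1 else 0))
          = ∑ j ∈ Finset.range s.length,
              (if (j + d + 2 ≤ s.length ∧ d % 2 = 1 ∧ palB s (d + 2) j = true) then 1 else 0) := by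
      intro d hd
      have h1 : (∑ j ∈ Finset.range (s.length - 1 - d),
            (if ((d + 2) % 2 = 1 ∧ palB s (d + 2) j = true) then 1 else 0))
          = ∑ j ∈ Finset.range (s.length - 1 - d),
              (if (j + d + 2 ≤ s.length ∧ d % 2 = 1 ∧ palB s (d + 2) j = true) then 1 else 0) := by
        apply Finset.sum_congr rfl
        intro j hj
        rw [Finset.mem_range] at hj
        apply if_congr _ rfl rfl
        constructor
        · rintro ⟨h1, h2⟩
          exact ⟨by omega, by omega, h2⟩
        · rintro ⟨-, h1, h2⟩
          exact ⟨by omega, h2⟩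
      rw [h1]
      have hsub : Finset.range (s.length - 1 - d) ⊆ Finset.range s.length := by
        intro x hx
        rw [Finset.mem_range] at hx ⊢
        omega
      apply Finset.sum_subset hsub
      intro j _ hj
      rw [Finset.mem_range] at hj
      rw [if_neg]
      rintro ⟨h1, -, -⟩
      omega
    rw [Finset.sum_congr rfl (fun d hd => inner d (Finset.mem_range.mp hd))]
    have hsub : Finset.range (s.length - 1) ⊆ Finset.range s.length := by
      intro x hx
      rw [Finset.mem_range] at hx ⊢
      omega
    apply Finset.sum_subset hsub
    intro d _ hd
    rw [Finset.mem_range] at hd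
    apply Finset.sum_eq_zero
    intro j _
    rw [if_neg]
    rintro ⟨h1, -, -⟩
    omega
  rw [step1]
  rw [← Finset.sum_product' (Finset.range s.length) (Finset.range s.length)
        (fun d j => if (j + d + 2 ≤ s.length ∧ d % 2 = 1 ∧ palB s (d + 2) j = true) then 1 else 0)]
  rw [← Finset.sum_product' (Finset.range s.length) (Finset.range s.length)
        (fun c t => if goodB s c (t + 1) = true then 1 else 0)]
  rw [← Finset.card_filter, ← Finset.card_filter]
  refine Finset.card_bij'
    (fun p _ => (p.2 + (p.1 + 1) / 2, (p.1 - 1) / 2))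
    (fun p _ => (2 * p.2 + 1, p.1 - p.2 - 1)) ?hi ?hj ?li ?ri
  case hi =>
    rintro ⟨d, j⟩ ha
    simp only [Finset.mem_filter, Finset.mem_product, Finset.mem_range] at ha ⊢
    obtain ⟨⟨hdn, hjn⟩, hbnd, hodd, hpal⟩ := ha
    have hm : d = 2 * ((d - 1) / 2) + 1 := by omega
    set m := (d - 1) / 2 with hmdef
    have e1 : (d + 1) / 2 = m + 1 := by omega
    have hg := (palB_iff_goodE s (j + m + 1) (m + 1) (by omega) (by omega)).mp
    have e2 : (j + m + 1) - (m + 1) = j := by omega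
    have e3 : 2 * (m + 1) + 1 = d + 2 := by omega
    rw [e2, e3] at hg
    refine ⟨⟨by omega, by omega⟩, ?_⟩
    rw [e1]
    unfold goodB
    rw [decide_eq_true_eq]
    exact ⟨by omega, by omega, hg hpal⟩
  case hj =>
    rintro ⟨c, t⟩ ha
    simp only [Finset.mem_filter, Finset.mem_product, Finset.mem_range] at ha ⊢
    obtain ⟨⟨hcn, htn⟩, hgood⟩ := ha
    unfold goodB at hgood
    rw [decide_eq_true_eq] at hgood
    obtain ⟨htc, hbnd, hE⟩ := hgood
    have hpal := (palB_iff_goodE s c (t + 1) (by omega) (by omega)).mpr hE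
    have e1 : c - (t + 1) = c - t - 1 := by omega
    have e2 : 2 * (t + 1) + 1 = 2 * t + 1 + 2 := by omega
    rw [e1, e2] at hpal
    exact ⟨⟨by omega, by omega⟩, by omega, by omega, hpal⟩
  case li =>
    rintro ⟨d, j⟩ ha
    simp only [Finset.mem_filter, Finset.mem_product, Finset.mem_range] at ha
    obtain ⟨⟨hdn, hjn⟩, hbnd, hodd, hpal⟩ := ha
    simp only [Prod.mk.injEq]
    constructor <;> omega
  case ri =>
    rintro ⟨c, t⟩ ha
    simp only [Finset.mem_filter, Finset.mem_product, Finset.mem_range] at ha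
    obtain ⟨⟨hcn, htn⟩, hgood⟩ := ha
    unfold goodB at hgood
    rw [decide_eq_true_eq] at hgood
    simp only [Prod.mk.injEq]
    constructor <;> omega

theorem sum_counts (s : List Char) :
    2 * ((∑ d ∈ Finset.range (s.length - 1), ∑ j ∈ Finset.range (s.length - 1 - d), fN s (d + 2) j)
        + (∑ c ∈ Finset.range s.length, ∑ t ∈ Finset.range s.length, (if goodB s c (t + 1) = true then 1 else 0)))
      = s.length * (s.length - 1) := by
  have hcompl : ∀ d j : ℕ, fN s (d + 2) j
      + (if ((d + 2) % 2 = 1 ∧ palB s (d + 2) j = true) then 1 else 0) = 1 := by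
    intro d j
    unfold fN
    by_cases hp : palB s (d + 2) j = true
    · by_cases hm : (d + 2) % 2 = 0
      · rw [if_pos (Or.inl hm), if_neg (by rintro ⟨h1, -⟩; omega)]
      · rw [if_neg (by rintro (h | h); exact hm h; exact h hp), if_pos ⟨by omega, hp⟩]
    · rw [if_pos (Or.inr hp), if_neg (fun h => hp h.2)]
  have hsplit : (∑ d ∈ Finset.range (s.length - 1), ∑ j ∈ Finset.range (s.length - 1 - d), fN s (d + 2) j)
      + (∑ d ∈ Finset.range (s.length - 1), ∑ j ∈ Finset.range (s.length - 1 - d),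
          (if ((d + 2) % 2 = 1 ∧ palB s (d + 2) j = true) then 1 else 0))
      = ∑ d ∈ Finset.range (s.length - 1), (s.length - 1 - d) := by
    rw [← Finset.sum_add_distrib]
    apply Finset.sum_congr rfl
    intro d _
    rw [← Finset.sum_add_distrib]
    rw [Finset.sum_congr rfl (fun j _ => hcompl d j)]
    simp
  have hT' : ∀ m : ℕ, 2 * (∑ d ∈ Finset.range m, (m - d)) = m * (m + 1) := by
    intro m
    induction m with
    | zero => simp
    | succ k ih =>
      have h1 : (∑ d ∈ Finset.range (k + 1), (k + 1 - d))
          = (∑ d ∈ Finset.range k, (k - d)) + (k + 1) := by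
        rw [Finset.sum_range_succ]
        have h2 : (∑ d ∈ Finset.range k, (k + 1 - d)) = ∑ d ∈ Finset.range k, ((k - d) + 1) := by
          apply Finset.sum_congr rfl
          intro d hd
          rw [Finset.mem_range] at hd
          omega
        rw [h2, Finset.sum_add_distrib]
        simp
        omega
      rw [h1]
      have h3 : 2 * ((∑ d ∈ Finset.range k, (k - d)) + (k + 1))
          = k * (k + 1) + 2 * (k + 1) := by omega
      rw [h3]
      ring
  have hT : 2 * (∑ d ∈ Finset.range (s.length - 1), (s.length - 1 - d))
      = s.length * (s.length - 1) := by
    rcases s.length with _ | m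
    · simp
    · have := hT' m
      simp only [Nat.add_sub_cancel]
      rw [this]
      ring
  rw [← gsum_eq s, hsplit]
  exact hT

theorem int_div_lemma (N S G : ℕ) (h : 2 * (S + G) = N * (N - 1)) :
    (S : Int) = PySem.Int.floordiv ((N : Int) * ((N : Int) - 1)) 2 - (G : Int) := by
  rcases N with _ | m
  · obtain ⟨h1, h2⟩ : S = 0 ∧ G = 0 := by omega
    subst h1; subst h2
    norm_num
  · have e : (((m + 1 : ℕ) : Int)) * (((m + 1 : ℕ) : Int) - 1) = (((m + 1) * m : ℕ) : Int) := by
      push_cast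
      ring
    rw [e]
    have e2 : PySem.Int.floordiv ((((m + 1) * m : ℕ)) : Int) 2 = (((m + 1) * m / 2 : ℕ) : Int) := by
      have h3 := PySem.Int.floordiv_natCast ((m + 1) * m) 2
      exact_mod_cast h3
    rw [e2]
    have hN : (m + 1) * ((m + 1) - 1) = (m + 1) * m := by simp
    rw [hN] at h
    generalize hP : (m + 1) * m = P at *
    omega

-- ===== VERDICT (by name: the statement is the Claim_ definition above) =====
theorem noRotate_spec : Claim_equal_noRotate := by
  intro str _
  unfold Spec_noRotate
  rw [noRotate_eq_sum, noRotate_alt_eq_sum]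
  exact int_div_lemma str.toList.length _ _ (sum_counts str.toList)
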